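-- pv_equiv track=rewrite | github.com/deeppavlov/DeepPavlov | deeppavlov/models/torch_bert/torch_transformers_sequence_tagger_spans.py | token_labels_to_subtoken_labels_spans
-- ===== SOURCE A (Python) =====
-- def token_labels_to_subtoken_labels_spans(start_labels, end_labels, y_mask, input_mask):
--     labels_ind = 0
--     subtoken_labels_start = [0 for _ in input_mask]
--     if any([el == 1 for el in start_labels]):
--         for n, el in enumerate(y_mask):
--             if el == 1:
--                 subtoken_labels_start[n] = start_labels[labels_ind]
--                 labels_ind += 1
--     labels_ind = 0
--     subtoken_labels_end = [0 for _ in input_mask]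
--     if any([el == 1 for el in end_labels]):
--         for n, el in enumerate(y_mask):
--             if el == 1:
--                 found_x = -1
--                 for x in range(n, len(y_mask)):
--                     if x == len(y_mask) - 1 or y_mask[x + 1] == 1:
--                         found_x = x
--                         break
--                 subtoken_labels_end[found_x] = end_labels[labels_ind]
--                 labels_ind += 1
--
--     return subtoken_labels_start, subtoken_labels_end
-- ===== SOURCE B (Python) =====
-- def token_labels_to_subtoken_labels_spans(start_labels, end_labels, y_mask, input_mask):
--     # Precompute token-group boundaries once instead of A's nested forward scan.
--     starts = [i for i, el in enumerate(y_mask) if el == 1]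
--     subtoken_labels_start = [0] * len(input_mask)
--     if any(el == 1 for el in start_labels):
--         for i, s in enumerate(starts):
--             subtoken_labels_start[s] = start_labels[i]
--     subtoken_labels_end = [0] * len(input_mask)
--     if any(el == 1 for el in end_labels):
--         for i, s in enumerate(starts):
--             e = starts[i + 1] - 1 if i + 1 < len(starts) else len(y_mask) - 1
--             subtoken_labels_end[e] = end_labels[i]
--     return subtoken_labels_start, subtoken_labels_end
-- ===== Notes on version B (the rewrite author's own statement) =====
-- stated objective: simpler
-- what changed: B precomputes the list of token start positions in one pass and assigns start labels at those positions and end labels at next-start-minus-one (or the last index), replacing A's nested per-token forward scan for the group end.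
import Mathlib
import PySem

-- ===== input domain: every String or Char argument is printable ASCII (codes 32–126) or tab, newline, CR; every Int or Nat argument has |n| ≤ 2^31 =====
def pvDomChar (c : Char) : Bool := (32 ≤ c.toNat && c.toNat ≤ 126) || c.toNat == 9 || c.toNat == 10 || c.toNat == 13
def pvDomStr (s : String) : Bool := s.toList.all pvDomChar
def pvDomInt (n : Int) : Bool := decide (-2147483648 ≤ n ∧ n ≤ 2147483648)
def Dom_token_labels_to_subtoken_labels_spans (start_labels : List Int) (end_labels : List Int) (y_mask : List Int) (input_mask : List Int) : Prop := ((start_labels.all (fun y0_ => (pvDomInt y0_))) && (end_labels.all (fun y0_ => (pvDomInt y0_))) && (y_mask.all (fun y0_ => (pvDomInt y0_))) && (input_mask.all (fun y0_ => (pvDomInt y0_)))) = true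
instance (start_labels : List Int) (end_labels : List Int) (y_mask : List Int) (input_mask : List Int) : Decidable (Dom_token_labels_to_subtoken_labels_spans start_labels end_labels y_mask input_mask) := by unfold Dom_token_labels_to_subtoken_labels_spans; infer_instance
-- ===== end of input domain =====

-- B precomputes the token-group start positions once and assigns labels by index,
-- replacing A's per-token inner forward scan; objective: simpler (same asymptotic cost).
-- Pre_ excludes exactly the inputs on which the Python A raises IndexError
-- (more 1-tokens in y_mask than labels, or a write position beyond len(input_mask)).

-- ===== PORT A =====
-- inner loop 'for x in range(n, len(y_mask)): if x == len-1 or y_mask[x+1] == 1: found_x = x; break'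
-- (fuel = number of remaining range elements; 0 fuel = loop exhausted, found_x stays -1)
def aFindXAux (ymf : List Int) (x : Nat) : Nat → Int
  | 0 => -1
  | fuel+1 =>
    if x = ymf.length - 1 ∨ ymf.getD (x+1) 0 = 1 then (x : Int) else aFindXAux ymf (x+1) fuel

def aFindX (ymf : List Int) (n : Nat) : Int := aFindXAux ymf n (ymf.length - n)

-- 'for n, el in enumerate(y_mask): if el == 1: subtoken_labels_start[n] = start_labels[labels_ind]; labels_ind += 1'
-- (Pre_ guarantees the indices are in range, so getD / set see exactly Python's values)
def aStartLoop (sl : List Int) : List Int → Nat → Nat → List Int → List Int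
  | [], _, _, arr => arr
  | e :: rest, n, ind, arr =>
    if e = 1 then aStartLoop sl rest (n+1) (ind+1) (arr.set n (sl.getD ind 0))
    else aStartLoop sl rest (n+1) ind arr

-- the end-label loop; found_x ≥ 0 on every reached iteration (x = len-1 always breaks), so .toNat is exact
def aEndLoop (el ymf : List Int) : List Int → Nat → Nat → List Int → List Int
  | [], _, _, arr => arr
  | e :: rest, n, ind, arr =>
    if e = 1 then aEndLoop el ymf rest (n+1) (ind+1) (arr.set (aFindX ymf n).toNat (el.getD ind 0))
    else aEndLoop el ymf rest (n+1) ind arr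

def token_labels_to_subtoken_labels_spans (start_labels : List Int) (end_labels : List Int) (y_mask : List Int) (input_mask : List Int) : List Int × List Int :=
  let s0 := input_mask.map (fun _ => (0 : Int))          -- [0 for _ in input_mask]
  let subtoken_labels_start :=
    if 1 ∈ start_labels then aStartLoop start_labels y_mask 0 0 s0 else s0
  let e0 := input_mask.map (fun _ => (0 : Int))
  let subtoken_labels_end :=
    if 1 ∈ end_labels then aEndLoop end_labels y_mask y_mask 0 0 e0 else e0
  (subtoken_labels_start, subtoken_labels_end)

-- ===== PORT B =====
-- 'starts = [i for i, el in enumerate(y_mask) if el == 1]'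
def bStartsOf : List Int → Nat → List Nat
  | [], _ => []
  | e :: rest, n => if e = 1 then n :: bStartsOf rest (n+1) else bStartsOf rest (n+1)

-- 'for i, s in enumerate(starts): subtoken_labels_start[s] = start_labels[i]'
def bStartLoop (sl : List Int) : List Nat → Nat → List Int → List Int
  | [], _, arr => arr
  | s :: rest, i, arr => bStartLoop sl rest (i+1) (arr.set s (sl.getD i 0))

-- 'e = starts[i+1] - 1 if i+1 < len(starts) else len(y_mask) - 1; subtoken_labels_end[e] = end_labels[i]'
def bEndLoop (el : List Int) (ymlen : Nat) : List Nat → Nat → List Int → List Int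
  | [], _, arr => arr
  | s :: rest, i, arr =>
    let e := match rest with | s' :: _ => s' - 1 | [] => ymlen - 1
    bEndLoop el ymlen rest (i+1) (arr.set e (el.getD i 0))

def token_labels_to_subtoken_labels_spans_alt (start_labels : List Int) (end_labels : List Int) (y_mask : List Int) (input_mask : List Int) : List Int × List Int :=
  let starts := bStartsOf y_mask 0
  let s0 := List.replicate input_mask.length (0 : Int)   -- [0] * len(input_mask)
  let subtoken_labels_start :=
    if 1 ∈ start_labels then bStartLoop start_labels starts 0 s0 else s0
  let e0 := List.replicate input_mask.length (0 : Int)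
  let subtoken_labels_end :=
    if 1 ∈ end_labels then bEndLoop end_labels y_mask.length starts 0 e0 else e0
  (subtoken_labels_start, subtoken_labels_end)

-- ===== PRECONDITION & SPEC =====
-- Pre_ excludes exactly the inputs on which the Python A raises IndexError: when a guard fires,
-- there must be enough labels for the 1-tokens of y_mask and every written position must lie
-- inside input_mask (start side writes at the 1-positions, end side up to len(y_mask)-1).
def Pre_token_labels_to_subtoken_labels_spans (start_labels : List Int) (end_labels : List Int) (y_mask : List Int) (input_mask : List Int) : Prop :=
  ((1 ∈ start_labels) →
    y_mask.count 1 ≤ start_labels.length ∧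
    ∀ i ∈ List.range y_mask.length, y_mask.getD i 0 = 1 → i < input_mask.length) ∧
  ((1 ∈ end_labels) →
    y_mask.count 1 ≤ end_labels.length ∧
    ((1 ∈ y_mask) → y_mask.length ≤ input_mask.length))
instance (start_labels : List Int) (end_labels : List Int) (y_mask : List Int) (input_mask : List Int) : Decidable (Pre_token_labels_to_subtoken_labels_spans start_labels end_labels y_mask input_mask) := by unfold Pre_token_labels_to_subtoken_labels_spans; infer_instance

def pvWitness_token_labels_to_subtoken_labels_spans : List Int × List Int × List Int × List Int :=
  ([1], [1], [0, 1, 0], [0, 0, 0])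

def Spec_token_labels_to_subtoken_labels_spans (start_labels : List Int) (end_labels : List Int) (y_mask : List Int) (input_mask : List Int) (out : List Int × List Int) : Prop := out = token_labels_to_subtoken_labels_spans_alt start_labels end_labels y_mask input_mask
instance (start_labels : List Int) (end_labels : List Int) (y_mask : List Int) (input_mask : List Int) (out : List Int × List Int) : Decidable (Spec_token_labels_to_subtoken_labels_spans start_labels end_labels y_mask input_mask out) := by unfold Spec_token_labels_to_subtoken_labels_spans; infer_instance

-- ===== CLAIM (what is proved, stated in full; the proofs are below) =====
def Claim_equal_token_labels_to_subtoken_labels_spans : Prop := ∀ (start_labels : List Int) (end_labels : List Int) (y_mask : List Int) (input_mask : List Int), Dom_token_labels_to_subtoken_labels_spans start_labels end_labels y_mask input_mask → Pre_token_labels_to_subtoken_labels_spans start_labels end_labels y_mask input_mask → Spec_token_labels_to_subtoken_labels_spans start_labels end_labels y_mask input_mask (token_labels_to_subtoken_labels_spans start_labels end_labels y_mask input_mask)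

-- ===== LEMMAS AND PROOFS =====

lemma startLoop_eq (sl : List Int) :
    ∀ (ym : List Int) (n ind : Nat) (arr : List Int),
      aStartLoop sl ym n ind arr = bStartLoop sl (bStartsOf ym n) ind arr := by
  intro ym
  induction ym with
  | nil => intro n ind arr; simp [aStartLoop, bStartsOf, bStartLoop]
  | cons e rest ih =>
    intro n ind arr
    by_cases h : e = 1 <;> simp [aStartLoop, bStartsOf, bStartLoop, h, ih]

lemma findX_eq (ymf : List Int) :
    ∀ (rest : List Int) (n : Nat), ymf.drop (n+1) = rest → n < ymf.length →
      aFindX ymf n =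
        Int.ofNat (match bStartsOf rest (n+1) with | s' :: _ => s' - 1 | [] => ymf.length - 1) := by
  intro rest
  induction rest with
  | nil =>
    intro n hd hn
    have hlen : ymf.length ≤ n + 1 := by
      have := congrArg List.length hd; simp at this; omega
    have hx : n = ymf.length - 1 := by omega
    have hfuel : ymf.length - n = 1 := by omega
    rw [aFindX, hfuel]
    simp [aFindXAux, hx, bStartsOf]
  | cons r rest' ih =>
    intro n hd hn
    have hlen : n + 1 < ymf.length := by
      have := congrArg List.length hd; simp at this; omega
    have hget : ymf[n+1]? = some r := by
      have h0 : (ymf.drop (n+1))[0]? = some r := by rw [hd]; rfl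
      rw [List.getElem?_drop] at h0
      simpa using h0
    have hfuel : ymf.length - n = (ymf.length - (n+1)) + 1 := by omega
    have hne : ¬ n = ymf.length - 1 := by omega
    rw [aFindX, hfuel]
    by_cases hr : r = 1
    · simp [aFindXAux, List.getD, hget, hne, hr, bStartsOf]
    · have hd' : ymf.drop (n+2) = rest' := by
        have h2 : ymf.drop (n+2) = (ymf.drop (n+1)).drop 1 := by rw [List.drop_drop]
        rw [h2, hd]; rfl
      have hrec := ih (n+1) hd' hlen
      simp only [aFindX] at hrec
      simp [aFindXAux, List.getD, hget, hne, hr, bStartsOf, hrec]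

lemma endLoop_eq (el ymf : List Int) :
    ∀ (ym : List Int) (n ind : Nat) (arr : List Int), ymf.drop n = ym →
      aEndLoop el ymf ym n ind arr = bEndLoop el ymf.length (bStartsOf ym n) ind arr := by
  intro ym
  induction ym with
  | nil => intro n ind arr _; simp [aEndLoop, bStartsOf, bEndLoop]
  | cons e rest ih =>
    intro n ind arr hd
    have hn : n < ymf.length := by
      by_contra h
      rw [List.drop_eq_nil_of_le (by omega)] at hd
      exact (List.cons_ne_nil e rest) hd.symm
    have hd' : ymf.drop (n+1) = rest := by
      have h2 : ymf.drop (n+1) = (ymf.drop n).drop 1 := by rw [List.drop_drop]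
      rw [h2, hd]; rfl
    have hfx := findX_eq ymf rest n hd' hn
    by_cases h : e = 1
    · simp [aEndLoop, bStartsOf, bEndLoop, h, hfx]
      exact ih (n+1) (ind+1) _ hd'
    · simp [aEndLoop, bStartsOf, h]
      exact ih (n+1) ind arr hd'

-- ===== VERDICT (by name: the statement is the Claim_ definition above) =====
theorem token_labels_to_subtoken_labels_spans_spec : Claim_equal_token_labels_to_subtoken_labels_spans := by
  intro sl el ym im _ _
  unfold Spec_token_labels_to_subtoken_labels_spans
  unfold token_labels_to_subtoken_labels_spans token_labels_to_subtoken_labels_spans_alt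
  have he : ∀ z, aEndLoop el ym ym 0 0 z = bEndLoop el ym.length (bStartsOf ym 0) 0 z :=
    fun z => endLoop_eq el ym ym 0 0 z (by simp)
  simp [List.map_const', startLoop_eq, he]
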